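-- pv_equiv track=rewrite | github.com/carlalozu/serinv-utils | flops/scpobasi_flops.py | scpobasi_flops
-- ===== SOURCE A (Python) =====
-- def scpobasi_flops(n_diagonals, n_offdiags, arrowhead_blocksize):
--
--
--     FLOPS = 0
--     counts = {
--         'triangular_solve_nb3': 0,
--         'vector_scaling_ns': 0,
--         'vector_scaling_nb': 0,
--         'element_scaling': 0,
--         'div': 0,
--         'dot_product_ns': 0,
--         'dot_product_nb': 0,
--         'matrix_vector_nsns': 0,
--         'matrix_vector_nsnb': 0,
--         'matrix_vector_nbnb': 0,
--         'DGEMM_nb3': 0,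
--     }
--
--     # Arrowhead inversion first
--     counts['div'] += 1
--     FLOPS += 1
--
--     # X_{ndb+1, ndb+1}
--     counts['DGEMM_nb3'] += 1
--     FLOPS += 2 * arrowhead_blocksize**3
--
--     # X_{ndb+1,ndb}
--     counts['matrix_vector_nbnb'] += 1
--     FLOPS += 2 * arrowhead_blocksize * arrowhead_blocksize
--     counts['vector_scaling_nb'] += 1
--     FLOPS += arrowhead_blocksize
--
--     # X_{ndb,ndb}
--     counts['dot_product_nb'] += 1
--     FLOPS += 2 * arrowhead_blocksize
--     counts['element_scaling'] += 1
--     FLOPS += 1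
--
--     # Rest of the matrix
--     for i in range(2, n_diagonals+1):
--
--         # Adjust for the size of the block E, under the diagonal
--         tail = min(i - 1, n_offdiags)
--
--         # Inverse of the L diagonal value i, L_{i, i}^{-1}
--         counts['div'] += 1
--         FLOPS += 1
--
--         # --- Off-diagonal slice part ---
--         # X_{i+1, i} = (-X_{i+1, i+1} L_{i+1, i} -
--         #              X_{ndb+1, i+1}^{T} L_{ndb+1, i}) L_{i, i}^{-1}
--         counts['matrix_vector_nsns'] += 1
--         FLOPS += 2 * tail**2
--         counts['matrix_vector_nsnb'] += 1
--         FLOPS += 2 * tail * arrowhead_blocksize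
--         counts['vector_scaling_ns'] += 1
--         FLOPS += tail
--
--         # --- Arrowhead part ---
--         # X_{ndb+1, i} = (- X_{ndb+1, i+1} L_{i+1, i} -
--         #                X_{ndb+1, ndb+1} L_{ndb+1, i}) L_{i, i}^{-1}
--         counts['matrix_vector_nsnb'] += 1
--         FLOPS += 2 * tail * arrowhead_blocksize
--         counts['matrix_vector_nbnb'] += 1
--         FLOPS += 2 * arrowhead_blocksize**2
--         counts['vector_scaling_nb'] += 1
--         FLOPS += arrowhead_blocksize
--
--         # --- Diagonal value part ---
--         # X_{i, i} = (L_{i, i}^{-T} - X_{i+1, i}^{T} L_{i+1, i} -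
--         #            X_{ndb+1, i}.conj().T L_{ndb+1, i}) L_{i, i}^{-1}
--         counts['dot_product_ns'] += 1
--         FLOPS += 2 * tail
--         counts['dot_product_nb'] += 1
--         FLOPS += 2 * arrowhead_blocksize
--         counts['element_scaling'] += 1
--         FLOPS += 1
--
--     return FLOPS
-- ===== SOURCE B (Python) =====
-- def scpobasi_flops(n_diagonals, n_offdiags, arrowhead_blocksize):
--     # Closed form: base cost + per-iteration constant + series sums of min(t, n_offdiags)
--     b = arrowhead_blocksize
--     k = n_offdiags
--     m = max(0, n_diagonals - 1)          # number of loop iterations in A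
--     # s1 = sum_{t=1}^{m} min(t, k),  s2 = sum_{t=1}^{m} min(t, k)^2
--     if k <= 0:
--         s1, s2 = m * k, m * k * k
--     elif k >= m:
--         s1 = m * (m + 1) // 2
--         s2 = m * (m + 1) * (2 * m + 1) // 6
--     else:
--         s1 = k * (k + 1) // 2 + (m - k) * k
--         s2 = k * (k + 1) * (2 * k + 1) // 6 + (m - k) * k * k
--     return (2 * b**3 + 2 * b**2 + 3 * b + 2
--             + m * (2 * b * b + 3 * b + 2)
--             + 2 * s2 + (4 * b + 3) * s1)
-- ===== Notes on version B (the rewrite author's own statement) =====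
-- stated objective: faster
-- what changed: Replaced A's O(n_diagonals) accumulation loop (with a bookkeeping counts dict) by a closed-form formula: base cost plus per-iteration constant times the iteration count plus Gauss/square-pyramid series sums of min(t, n_offdiags), split at the point where the min saturates.
import Mathlib
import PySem

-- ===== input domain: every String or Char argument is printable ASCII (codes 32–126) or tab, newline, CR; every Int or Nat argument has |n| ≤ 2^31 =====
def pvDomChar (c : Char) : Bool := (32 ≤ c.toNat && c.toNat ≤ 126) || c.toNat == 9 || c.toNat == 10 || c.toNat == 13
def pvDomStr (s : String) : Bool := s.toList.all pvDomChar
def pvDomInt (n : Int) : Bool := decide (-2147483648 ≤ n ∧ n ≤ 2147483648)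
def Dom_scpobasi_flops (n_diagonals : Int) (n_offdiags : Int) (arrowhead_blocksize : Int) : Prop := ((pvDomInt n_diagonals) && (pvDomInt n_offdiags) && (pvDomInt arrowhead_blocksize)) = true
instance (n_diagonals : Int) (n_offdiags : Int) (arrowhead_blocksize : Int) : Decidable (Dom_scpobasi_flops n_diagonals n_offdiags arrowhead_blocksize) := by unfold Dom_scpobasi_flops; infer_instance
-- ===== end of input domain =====

-- B replaces A's O(n_diagonals) loop with a closed-form sum (Gauss/pyramid series split at min(i-1, n_offdiags)); objective: faster.

-- ===== PORT A =====
-- loop body of A's `for i in range(2, n_diagonals+1)` (state = (FLOPS, counts))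
def scpobasiStep (n_offdiags : Int) (arrowhead_blocksize : Int)
    (st : Int × PySem.Dict String Int) (i : Int) : Int × PySem.Dict String Int :=
  let FLOPS := st.1
  let counts := st.2
  let tail := min (i - 1) n_offdiags
  let counts := counts.modify "div" 0 (· + 1)
  let FLOPS := FLOPS + 1
  let counts := counts.modify "matrix_vector_nsns" 0 (· + 1)
  let FLOPS := FLOPS + 2 * tail ^ 2
  let counts := counts.modify "matrix_vector_nsnb" 0 (· + 1)
  let FLOPS := FLOPS + 2 * tail * arrowhead_blocksize
  let counts := counts.modify "vector_scaling_ns" 0 (· + 1)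
  let FLOPS := FLOPS + tail
  let counts := counts.modify "matrix_vector_nsnb" 0 (· + 1)
  let FLOPS := FLOPS + 2 * tail * arrowhead_blocksize
  let counts := counts.modify "matrix_vector_nbnb" 0 (· + 1)
  let FLOPS := FLOPS + 2 * arrowhead_blocksize ^ 2
  let counts := counts.modify "vector_scaling_nb" 0 (· + 1)
  let FLOPS := FLOPS + arrowhead_blocksize
  let counts := counts.modify "dot_product_ns" 0 (· + 1)
  let FLOPS := FLOPS + 2 * tail
  let counts := counts.modify "dot_product_nb" 0 (· + 1)
  let FLOPS := FLOPS + 2 * arrowhead_blocksize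
  let counts := counts.modify "element_scaling" 0 (· + 1)
  let FLOPS := FLOPS + 1
  (FLOPS, counts)

def scpobasi_flops (n_diagonals : Int) (n_offdiags : Int) (arrowhead_blocksize : Int) : Int :=
  let FLOPS : Int := 0
  let counts : PySem.Dict String Int := PySem.Dict.ofList
    [("triangular_solve_nb3", 0), ("vector_scaling_ns", 0), ("vector_scaling_nb", 0),
     ("element_scaling", 0), ("div", 0), ("dot_product_ns", 0), ("dot_product_nb", 0),
     ("matrix_vector_nsns", 0), ("matrix_vector_nsnb", 0), ("matrix_vector_nbnb", 0),
     ("DGEMM_nb3", 0)]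
  -- Arrowhead inversion first
  let counts := counts.modify "div" 0 (· + 1)
  let FLOPS := FLOPS + 1
  let counts := counts.modify "DGEMM_nb3" 0 (· + 1)
  let FLOPS := FLOPS + 2 * arrowhead_blocksize ^ 3
  let counts := counts.modify "matrix_vector_nbnb" 0 (· + 1)
  let FLOPS := FLOPS + 2 * arrowhead_blocksize * arrowhead_blocksize
  let counts := counts.modify "vector_scaling_nb" 0 (· + 1)
  let FLOPS := FLOPS + arrowhead_blocksize
  let counts := counts.modify "dot_product_nb" 0 (· + 1)
  let FLOPS := FLOPS + 2 * arrowhead_blocksize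
  let counts := counts.modify "element_scaling" 0 (· + 1)
  let FLOPS := FLOPS + 1
  -- Rest of the matrix
  let st := (PySem.List.pyRange 2 (n_diagonals + 1) 1).foldl
    (scpobasiStep n_offdiags arrowhead_blocksize) (FLOPS, counts)
  st.1

-- ===== PORT B =====
def scpobasi_flops_alt (n_diagonals : Int) (n_offdiags : Int) (arrowhead_blocksize : Int) : Int :=
  let b := arrowhead_blocksize
  let k := n_offdiags
  let m := max 0 (n_diagonals - 1)
  let s : Int × Int :=
    if k ≤ 0 then (m * k, m * k * k)
    else if m ≤ k then
      (PySem.Int.floordiv (m * (m + 1)) 2,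
       PySem.Int.floordiv (m * (m + 1) * (2 * m + 1)) 6)
    else
      (PySem.Int.floordiv (k * (k + 1)) 2 + (m - k) * k,
       PySem.Int.floordiv (k * (k + 1) * (2 * k + 1)) 6 + (m - k) * k * k)
  2 * b ^ 3 + 2 * b ^ 2 + 3 * b + 2 + m * (2 * b * b + 3 * b + 2) + 2 * s.2 + (4 * b + 3) * s.1

-- ===== PRECONDITION & SPEC =====
def Spec_scpobasi_flops (n_diagonals : Int) (n_offdiags : Int) (arrowhead_blocksize : Int) (out : Int) : Prop := out = scpobasi_flops_alt n_diagonals n_offdiags arrowhead_blocksize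
instance (n_diagonals : Int) (n_offdiags : Int) (arrowhead_blocksize : Int) (out : Int) : Decidable (Spec_scpobasi_flops n_diagonals n_offdiags arrowhead_blocksize out) := by unfold Spec_scpobasi_flops; infer_instance

-- ===== CLAIM (what is proved, stated in full; the proofs are below) =====
def Claim_equal_scpobasi_flops : Prop := ∀ (n_diagonals : Int) (n_offdiags : Int) (arrowhead_blocksize : Int), Dom_scpobasi_flops n_diagonals n_offdiags arrowhead_blocksize → Spec_scpobasi_flops n_diagonals n_offdiags arrowhead_blocksize (scpobasi_flops n_diagonals n_offdiags arrowhead_blocksize)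

-- ===== LEMMAS AND PROOFS =====

-- total FLOPS added by one iteration of A's loop at index i
def scpobasiCost (k b i : Int) : Int :=
  2 * (min (i - 1) k) ^ 2 + 4 * (min (i - 1) k) * b + 3 * (min (i - 1) k) + 2 * b * b + 3 * b + 2

lemma scpobasiStep_fst (k b : Int) (st : Int × PySem.Dict String Int) (i : Int) :
    (scpobasiStep k b st i).1 = st.1 + scpobasiCost k b i := by
  simp only [scpobasiStep, scpobasiCost]
  ring

lemma scpobasi_fold_fst (k b : Int) (l : List Int) (st : Int × PySem.Dict String Int) :
    (l.foldl (scpobasiStep k b) st).1 = st.1 + (l.map (scpobasiCost k b)).sum := by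
  induction l generalizing st with
  | nil => simp
  | cons i t ih => simp [List.foldl_cons, ih, scpobasiStep_fst]; ring

-- Σ_{i=2}^{m+1} cost(i), recursively
def scpobasiSumCost (k b : Int) : Nat → Int
  | 0 => 0
  | m + 1 => scpobasiSumCost k b m + scpobasiCost k b ((m : Int) + 2)

lemma scpobasi_range_sum (k b : Int) (m : Nat) :
    ((PySem.List.pyRange 2 ((m : Int) + 2) 1).map (scpobasiCost k b)).sum = scpobasiSumCost k b m := by
  induction m with
  | zero =>
      rw [show ((0 : Nat) : Int) + 2 = 2 by norm_num, PySem.List.pyRange_one_eq_nil (by omega)]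
      simp [scpobasiSumCost]
  | succ m ih =>
      rw [show ((m + 1 : Nat) : Int) + 2 = ((m : Int) + 2) + 1 by push_cast; ring,
          PySem.List.pyRange_one_succ_right (by omega)]
      simp [scpobasiSumCost, ih]

-- Σ_{t=1}^{m} min(t,k) and Σ_{t=1}^{m} min(t,k)^2
def sMin (k : Int) : Nat → Int
  | 0 => 0
  | m + 1 => sMin k m + min ((m : Int) + 1) k

def sMinSq (k : Int) : Nat → Int
  | 0 => 0
  | m + 1 => sMinSq k m + (min ((m : Int) + 1) k) * (min ((m : Int) + 1) k)

lemma scpobasiSumCost_eq (k b : Int) (m : Nat) :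
    scpobasiSumCost k b m = (m : Int) * (2 * b * b + 3 * b + 2) + (4 * b + 3) * sMin k m + 2 * sMinSq k m := by
  induction m with
  | zero => simp [scpobasiSumCost, sMin, sMinSq]
  | succ m ih =>
      have h : ((m : Int) + 2) - 1 = (m : Int) + 1 := by ring
      simp only [scpobasiSumCost, sMin, sMinSq, scpobasiCost, ih, h]
      push_cast
      ring

lemma sMin_closed (k : Int) (m : Nat) :
    2 * sMin k m = if k ≤ 0 then 2 * (m : Int) * k
      else if (m : Int) ≤ k then (m : Int) * ((m : Int) + 1)
      else k * (k + 1) + 2 * ((m : Int) - k) * k := by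
  induction m with
  | zero =>
      simp only [sMin, Nat.cast_zero, mul_zero, zero_mul, mul_comm]
      split_ifs with h1 h2 <;> first | (exfalso; omega) | ring
  | succ m ih =>
      simp only [sMin, Nat.cast_succ, mul_add]
      rw [ih]
      by_cases hk : k ≤ 0
      · rw [if_pos hk, if_pos hk, min_eq_right (by omega)]; ring
      · rw [if_neg hk, if_neg hk]
        by_cases h1 : (m : Int) + 1 ≤ k
        · rw [if_pos (by omega), if_pos h1, min_eq_left h1]; ring
        · rw [if_neg h1, min_eq_right (by omega)]
          by_cases h2 : (m : Int) ≤ k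
          · rw [if_pos h2]
            have : k = (m : Int) := by omega
            subst this; ring
          · rw [if_neg h2]; ring

lemma sMinSq_closed (k : Int) (m : Nat) :
    6 * sMinSq k m = if k ≤ 0 then 6 * (m : Int) * k * k
      else if (m : Int) ≤ k then (m : Int) * ((m : Int) + 1) * (2 * (m : Int) + 1)
      else k * (k + 1) * (2 * k + 1) + 6 * ((m : Int) - k) * k * k := by
  induction m with
  | zero =>
      simp only [sMinSq, Nat.cast_zero, mul_zero, zero_mul]
      split_ifs with h1 h2 <;> first | (exfalso; omega) | ring
  | succ m ih =>
      simp only [sMinSq, Nat.cast_succ, mul_add]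
      rw [ih]
      by_cases hk : k ≤ 0
      · rw [if_pos hk, if_pos hk, min_eq_right (by omega)]; ring
      · rw [if_neg hk, if_neg hk]
        by_cases h1 : (m : Int) + 1 ≤ k
        · rw [if_pos (by omega), if_pos h1, min_eq_left h1]; ring
        · rw [if_neg h1, min_eq_right (by omega)]
          by_cases h2 : (m : Int) ≤ k
          · rw [if_pos h2]
            have : k = (m : Int) := by omega
            subst this; ring
          · rw [if_neg h2]; ring

lemma floordiv_two_of_double (x y : Int) (h : x = 2 * y) : PySem.Int.floordiv x 2 = y := by
  subst h
  rw [PySem.Int.floordiv_eq_ediv_of_pos (by norm_num)]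
  omega

lemma floordiv_six_of_six (x y : Int) (h : x = 6 * y) : PySem.Int.floordiv x 6 = y := by
  subst h
  rw [PySem.Int.floordiv_eq_ediv_of_pos (by norm_num)]
  omega

-- ===== VERDICT (by name: the statement is the Claim_ definition above) =====
theorem scpobasi_flops_spec : Claim_equal_scpobasi_flops := by
  intro n k b _
  unfold Spec_scpobasi_flops
  show scpobasi_flops n k b = scpobasi_flops_alt n k b
  set m : Nat := (n - 1).toNat with hm
  have hrange : n + 1 = (m : Int) + 2 ∨ n - 1 ≤ 0 := by omega
  have hA : scpobasi_flops n k b =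
      2 * b ^ 3 + 2 * b ^ 2 + 3 * b + 2 +
        ((PySem.List.pyRange 2 (n + 1) 1).map (scpobasiCost k b)).sum := by
    simp only [scpobasi_flops, scpobasi_fold_fst]
    ring
  have hmax : max 0 (n - 1) = (m : Int) := by omega
  rcases hrange with h | h
  · -- n ≥ 1
    rw [hA, h, scpobasi_range_sum, scpobasiSumCost_eq]
    have h1 := sMin_closed k m
    have h2 := sMinSq_closed k m
    simp only [scpobasi_flops_alt, hmax]
    by_cases hk : k ≤ 0
    · rw [if_pos hk] at h1 h2 ⊢
      have e1 : sMin k m = (m : Int) * k := by linarith [h1]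
      have e2 : sMinSq k m = (m : Int) * k * k := by
        nlinarith [h2]
      rw [e1, e2]; ring
    · rw [if_neg hk] at h1 h2 ⊢
      by_cases h3 : (m : Int) ≤ k
      · rw [if_pos h3] at h1 h2 ⊢
        rw [floordiv_two_of_double _ (sMin k m) h1.symm,
            floordiv_six_of_six _ (sMinSq k m) h2.symm]
        ring
      · rw [if_neg h3] at h1 h2 ⊢
        have e1 : PySem.Int.floordiv (k * (k + 1)) 2 = sMin k m - ((m : Int) - k) * k := by
          apply floordiv_two_of_double; linarith [h1]
        have e2 : PySem.Int.floordiv (k * (k + 1) * (2 * k + 1)) 6 =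
            sMinSq k m - ((m : Int) - k) * k * k := by
          apply floordiv_six_of_six; nlinarith [h2]
        rw [e1, e2]; ring
  · -- n ≤ 1 : loop empty, m = 0
    have hm0 : m = 0 := by omega
    rw [hA, PySem.List.pyRange_one_eq_nil (by omega)]
    simp only [scpobasi_flops_alt, hmax, hm0, Nat.cast_zero, List.map_nil, List.sum_nil]
    by_cases hk : k ≤ 0
    · rw [if_pos hk]; ring
    · rw [if_neg hk, if_pos (by omega : (0:Int) ≤ k),
          show (0:Int) * (0 + 1) * (2 * 0 + 1) = 0 by ring, show (0:Int) * (0 + 1) = 0 by ring,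
          floordiv_two_of_double 0 0 (by ring), floordiv_six_of_six 0 0 (by ring)]
      ring
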